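-- pv_equiv track=rewrite | github.com/sikaneta/avoc | day05.py | coupleMapRec
-- ===== SOURCE A (Python) =====
-- from collections import defaultdict
--
-- def intersection(r1, r2):
--     if r1[-1] <= r2[0] or r2[-1] <= r1[0]:
--         return []
--     return [k for k in sorted(list(r1) + list(r2))[1:3]]
--
-- def difference(r1, r2):
--     r1andr2 = intersection(r1, r2)
--     if len(r1andr2) == 0:
--         return [r1]
--     retval = []
--     if r1andr2[0] > r1[0]:
--         retval.append([r1[0], r1andr2[0]])
--     if r1andr2[1] < r1[1]:
--         retval.append([r1andr2[1], r1[1]])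
--     return retval
--
-- def joinmap(map1, map2):
--     tokens1 = [int(x) for x in map1.split()]
--     tokens2 = [int(x) for x in map2.split()]
--     t1andt2 = intersection([tokens1[0], tokens1[0]+tokens1[-1]],
--                            [tokens2[1], tokens2[1]+tokens2[-1]])
--     t1minust2 = difference([tokens1[0], tokens1[0]+tokens1[-1]],
--                            [tokens2[1], tokens2[1]+tokens2[-1]])
--     t2minust1 = difference([tokens2[1], tokens2[1]+tokens2[-1]],
--                            [tokens1[0], tokens1[0]+tokens1[-1]])
--     t1d = tokens1[1] - tokens1[0]
--     t2d = tokens2[1] - tokens2[0]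
--     m1 = [i + t1d for i in t1andt2]
--     joined = defaultdict(list)
--     if len(m1) > 0:
--         joined["intersection"] = ["%d %d %d" % (t1andt2[0] - t2d,
--                        m1[0], m1[1]-m1[0])]
--     for pair in t1minust2:
--         joined["primary"].append("%d %d %d" % (pair[0], pair[0] + t1d, pair[1]-pair[0]))
--     for pair in t2minust1:
--         joined["secondary"].append("%d %d %d" % (pair[0] - t2d, pair[0], pair[1]-pair[0]))
--
--     return joined
--
-- def coupleMapRec(primary, secondary):
--     for pk in range(len(primary)):
--         for sk in range(len(secondary)):
--             group = joinmap(primary[pk], secondary[sk])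
--             if "intersection" in group.keys():
--                 newp = primary[:pk] + group["primary"] + primary[(pk+1):]
--                 news = secondary[:sk] + group["secondary"] + secondary[(sk+1):]
--                 return group["intersection"] + coupleMapRec(newp, news)
--
--     return primary + secondary
-- ===== SOURCE B (Python) =====
-- def coupleMapRec(primary, secondary):
--     # Iterative accumulator loop working directly on integer triples: parse the two
--     # maps of each examined pair, test overlap arithmetically, and build the
--     # intersection / leftover pieces with plain arithmetic -- no dicts, no
--     # intersection/difference/joinmap helper layer, no recursion.
--     result = []
--     prim, sec = list(primary), list(secondary)
--     while True:
--         hit = None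
--         for pk, p in enumerate(prim):
--             for sk, s in enumerate(sec):
--                 t = [int(x) for x in p.split()]
--                 a1, b1, l1 = t[0], t[1], t[-1]
--                 t = [int(x) for x in s.split()]
--                 a2, b2, l2 = t[0], t[1], t[-1]
--                 if a1 + l1 > b2 and b2 + l2 > a1:
--                     hit = (pk, sk, (a1, b1, l1), (a2, b2, l2))
--                     break
--             if hit is not None:
--                 break
--         if hit is None:
--             return result + prim + sec
--         pk, sk, (a1, b1, l1), (a2, b2, l2) = hit
--         lo, hi = sorted([a1, a1 + l1, b2, b2 + l2])[1:3]
--         t1d, t2d = b1 - a1, b2 - a2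
--         result.append("%d %d %d" % (lo - t2d, lo + t1d, hi - lo))
--         pnew = []
--         if lo > a1:
--             pnew.append("%d %d %d" % (a1, a1 + t1d, lo - a1))
--         if hi < a1 + l1:
--             pnew.append("%d %d %d" % (hi, hi + t1d, a1 + l1 - hi))
--         snew = []
--         if lo > b2:
--             snew.append("%d %d %d" % (b2 - t2d, b2, lo - b2))
--         if hi < b2 + l2:
--             snew.append("%d %d %d" % (hi - t2d, hi, b2 + l2 - hi))
--         prim[pk:pk + 1] = pnew
--         sec[sk:sk + 1] = snew
-- ===== Notes on version B (the rewrite author's own statement) =====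
-- stated objective: alternative
-- what changed: B drops the whole joinmap/intersection/difference/defaultdict layer and the recursion: an iterative accumulator loop parses each examined pair into integer triples, tests overlap arithmetically, and builds the intersection string and the leftover pieces by direct arithmetic (one sort per hit instead of three sorts and a dict per examined pair).
-- outside the precondition, e.g. on coupleMapRec(['0 0 1', 'junk'], ['0 0 1']): A returns ['0 0 1', 'junk'], B returns ['0 0 1', 'junk']
import Mathlib
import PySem

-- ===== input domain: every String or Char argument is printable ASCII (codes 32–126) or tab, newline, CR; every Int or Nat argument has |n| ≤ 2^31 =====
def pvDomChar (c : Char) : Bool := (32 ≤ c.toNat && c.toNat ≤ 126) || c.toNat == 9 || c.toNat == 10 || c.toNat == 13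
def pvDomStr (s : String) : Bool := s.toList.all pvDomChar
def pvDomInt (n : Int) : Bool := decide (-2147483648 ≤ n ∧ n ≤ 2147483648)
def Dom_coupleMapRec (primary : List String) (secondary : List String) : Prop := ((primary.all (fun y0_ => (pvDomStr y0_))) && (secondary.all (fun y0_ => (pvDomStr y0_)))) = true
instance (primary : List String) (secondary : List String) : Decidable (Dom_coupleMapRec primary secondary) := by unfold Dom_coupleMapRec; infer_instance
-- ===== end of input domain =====

-- B replaces A's recursive joinmap/intersection/difference/defaultdict machinery by an
-- iterative accumulator loop over integer triples: each examined pair is parsed and the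
-- intersection and leftover pieces are computed by direct arithmetic (one sorted call per
-- hit, no dicts, no helper-function layer, no recursion). RETURN-value equivalence;
-- neither version mutates its arguments.

-- ===== PORT A =====
-- [int(x) for x in m.split()]  (appears verbatim in both Source A and Source B)
def tok (m : String) : List Int :=
  (PySem.Str.split₀ m).map (fun x => (PySem.Int.ofStr? x).getD 0)

-- "%d %d %d" % (a, b, c)  (both sources format with this same pattern)
def fmt3 (a b c : Int) : String :=
  PySem.Str.join " " [PySem.Int.toStr a, PySem.Int.toStr b, PySem.Int.toStr c]

-- intersection(r1, r2); callers always pass 2-element lists, defaults of pyGetD unreachable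
def intersectionP (r1 r2 : List Int) : List Int :=
  if PySem.List.pyGetD r1 (-1) 0 ≤ PySem.List.pyGetD r2 0 0 ∨
     PySem.List.pyGetD r2 (-1) 0 ≤ PySem.List.pyGetD r1 0 0 then []
  else PySem.List.slice (PySem.List.sorted (r1 ++ r2) (fun x => x) false) (some 1) (some 3)

-- difference(r1, r2)
def differenceP (r1 r2 : List Int) : List (List Int) :=
  let r1andr2 := intersectionP r1 r2
  if r1andr2.length = 0 then [r1]
  else
    let retval : List (List Int) := []
    let retval := if PySem.List.pyGetD r1andr2 0 0 > PySem.List.pyGetD r1 0 0 then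
        retval ++ [[PySem.List.pyGetD r1 0 0, PySem.List.pyGetD r1andr2 0 0]] else retval
    let retval := if PySem.List.pyGetD r1andr2 1 0 < PySem.List.pyGetD r1 1 0 then
        retval ++ [[PySem.List.pyGetD r1andr2 1 0, PySem.List.pyGetD r1 1 0]] else retval
    retval

-- joinmap(map1, map2); Pre_ guarantees every token parses (≥ 2 per map), so the int()
-- defaults and the pyGetD defaults are unreachable there; defaultdict append = Dict.modify
def joinmapP (map1 map2 : String) : PySem.Dict String (List String) :=
  let tokens1 := tok map1
  let tokens2 := tok map2
  let t1a := PySem.List.pyGetD tokens1 0 0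
  let t1b := PySem.List.pyGetD tokens1 1 0
  let t1l := PySem.List.pyGetD tokens1 (-1) 0
  let t2a := PySem.List.pyGetD tokens2 0 0
  let t2b := PySem.List.pyGetD tokens2 1 0
  let t2l := PySem.List.pyGetD tokens2 (-1) 0
  let t1andt2 := intersectionP [t1a, t1a + t1l] [t2b, t2b + t2l]
  let t1minust2 := differenceP [t1a, t1a + t1l] [t2b, t2b + t2l]
  let t2minust1 := differenceP [t2b, t2b + t2l] [t1a, t1a + t1l]
  let t1d := t1b - t1a
  let t2d := t2b - t2a
  let m1 := t1andt2.map (fun i => i + t1d)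
  let joined : PySem.Dict String (List String) := PySem.Dict.empty
  let joined := if m1.length > 0 then
      joined.insert "intersection"
        [fmt3 (PySem.List.pyGetD t1andt2 0 0 - t2d) (PySem.List.pyGetD m1 0 0)
              (PySem.List.pyGetD m1 1 0 - PySem.List.pyGetD m1 0 0)]
    else joined
  let joined := t1minust2.foldl (fun d pair =>
      d.modify "primary" [] (fun v => v ++
        [fmt3 (PySem.List.pyGetD pair 0 0) (PySem.List.pyGetD pair 0 0 + t1d)
              (PySem.List.pyGetD pair 1 0 - PySem.List.pyGetD pair 0 0)])) joined
  let joined := t2minust1.foldl (fun d pair =>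
      d.modify "secondary" [] (fun v => v ++
        [fmt3 (PySem.List.pyGetD pair 0 0 - t2d) (PySem.List.pyGetD pair 0 0)
              (PySem.List.pyGetD pair 1 0 - PySem.List.pyGetD pair 0 0)])) joined
  joined

-- A's inner loop 'for sk in range(len(secondary)):' with early return
def innerScanA (p : String) : List String → Int → Option (Int × PySem.Dict String (List String))
  | [], _ => none
  | s :: rest, sk =>
    let group := joinmapP p s
    if group.contains "intersection" then some (sk, group)
    else innerScanA p rest (sk + 1)

-- A's outer loop 'for pk in range(len(primary)):' with early return
def outerScanA : List String → List String → Int → Option (Int × Int × PySem.Dict String (List String))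
  | [], _, _ => none
  | p :: rest, sec, pk =>
    match innerScanA p sec 0 with
    | some (sk, g) => some (pk, sk, g)
    | none => outerScanA rest sec (pk + 1)

-- a generous upper bound on the number of merge steps (totality device for both ports;
-- under Pre_ the recursion always ends before the fuel does)
def pvFuel (primary secondary : List String) : Nat :=
  (((primary ++ secondary).map (fun m => (PySem.List.pyGetD (tok m) (-1) 0).natAbs)).sum
    + primary.length + secondary.length + 2) ^ 2

-- A: direct recursion, prepending group["intersection"] to the recursive result
def coupleMapRecFuelA : Nat → List String → List String → List String
  | 0, primary, secondary => primary ++ secondary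
  | fuel+1, primary, secondary =>
    match outerScanA primary secondary 0 with
    | some (pk, sk, group) =>
        group.getD "intersection" [] ++
        coupleMapRecFuelA fuel
          (PySem.List.slice primary none (some pk) ++ group.getD "primary" [] ++
             PySem.List.slice primary (some (pk + 1)) none)
          (PySem.List.slice secondary none (some sk) ++ group.getD "secondary" [] ++
             PySem.List.slice secondary (some (sk + 1)) none)
    | none => primary ++ secondary

def coupleMapRec (primary : List String) (secondary : List String) : List String :=
  coupleMapRecFuelA (pvFuel primary secondary) primary secondary

-- ===== PORT B =====
-- t = [int(x) for x in m.split()]; t[0], t[1], t[-1]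
def parse3B (m : String) : Int × Int × Int :=
  let t := tok m
  (PySem.List.pyGetD t 0 0, PySem.List.pyGetD t 1 0, PySem.List.pyGetD t (-1) 0)

-- B's first-hit scan: nested for with break, recording indices and both parsed triples
def scanB (prim sec : List String) :
    Option ((Int × Int) × (Int × Int × Int) × (Int × Int × Int)) :=
  (PySem.List.enumerate prim 0).findSome? (fun pe =>
    (PySem.List.enumerate sec 0).findSome? (fun se =>
      let t1 := parse3B pe.2
      let t2 := parse3B se.2
      if t1.1 + t1.2.2 > t2.2.1 ∧ t2.2.1 + t2.2.2 > t1.1 then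
        some ((pe.1, se.1), t1, t2)
      else none))

-- B's while-loop state (result, prim, sec); same fuel totality device as A's port
def loopB : Nat → List String → List String → List String → List String
  | 0, result, prim, sec => result ++ prim ++ sec
  | fuel+1, result, prim, sec =>
    match scanB prim sec with
    | none => result ++ prim ++ sec
    | some ((pk, sk), (a1, b1, l1), (a2, b2, l2)) =>
      let srt := PySem.List.sorted [a1, a1 + l1, b2, b2 + l2] (fun x => x) false
      let sl := PySem.List.slice srt (some 1) (some 3)
      let lo := PySem.List.pyGetD sl 0 0
      let hi := PySem.List.pyGetD sl 1 0
      let t1d := b1 - a1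
      let t2d := b2 - a2
      let pnew := (if lo > a1 then [fmt3 a1 (a1 + t1d) (lo - a1)] else []) ++
                  (if hi < a1 + l1 then [fmt3 hi (hi + t1d) (a1 + l1 - hi)] else [])
      let snew := (if lo > b2 then [fmt3 (b2 - t2d) b2 (lo - b2)] else []) ++
                  (if hi < b2 + l2 then [fmt3 (hi - t2d) hi (b2 + l2 - hi)] else [])
      loopB fuel (result ++ [fmt3 (lo - t2d) (lo + t1d) (hi - lo)])
        (PySem.List.slice prim none (some pk) ++ pnew ++ PySem.List.slice prim (some (pk + 1)) none)
        (PySem.List.slice sec none (some sk) ++ snew ++ PySem.List.slice sec (some (sk + 1)) none)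

def coupleMapRec_alt (primary : List String) (secondary : List String) : List String :=
  loopB (pvFuel primary secondary) [] primary secondary

-- ===== PRECONDITION & SPEC =====
-- Pre_ excludes the inputs on which Python A may raise: when both lists are nonempty it
-- requires every map string to split into at least two int()-parseable tokens (otherwise a
-- reached bad string raises ValueError/IndexError; whether a bad string is reached depends on
-- the run, so this is conservative — on excluded inputs where A happens to return, B returns
-- the same value); with an empty list A returns without parsing, so nothing is required.
def Pre_coupleMapRec (primary : List String) (secondary : List String) : Prop :=
  primary = [] ∨ secondary = [] ∨ ∀ m ∈ primary ++ secondary,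
    2 ≤ (PySem.Str.split₀ m).length ∧
    ∀ x ∈ PySem.Str.split₀ m, (PySem.Int.ofStr? x).isSome = true
instance (primary : List String) (secondary : List String) : Decidable (Pre_coupleMapRec primary secondary) := by
  unfold Pre_coupleMapRec; infer_instance

def pvWitness_coupleMapRec : List String × List String := (["0 1 2"], ["3 0 4"])

def Spec_coupleMapRec (primary : List String) (secondary : List String) (out : List String) : Prop := out = coupleMapRec_alt primary secondary
instance (primary : List String) (secondary : List String) (out : List String) : Decidable (Spec_coupleMapRec primary secondary out) := by unfold Spec_coupleMapRec; infer_instance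

-- ===== CLAIM (what is proved, stated in full; the proofs are below) =====
def Claim_equal_coupleMapRec : Prop := ∀ (primary : List String) (secondary : List String), Dom_coupleMapRec primary secondary → Pre_coupleMapRec primary secondary → Spec_coupleMapRec primary secondary (coupleMapRec primary secondary)

-- ===== LEMMAS AND PROOFS =====

-- the overlap test, as B writes it, on the parsed triples of two map strings
def ovlB (p s : String) : Bool :=
  decide ((parse3B p).1 + (parse3B p).2.2 > (parse3B s).2.1 ∧
          (parse3B s).2.1 + (parse3B s).2.2 > (parse3B p).1)

-- ghost scan: the indices and the STRINGS of the first overlapping pair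
def ghostInner (p : String) : List String → Int → Option (Int × String)
  | [], _ => none
  | s :: rest, sk => if ovlB p s then some (sk, s) else ghostInner p rest (sk + 1)

def ghostOuter : List String → List String → Int → Option (Int × Int × String × String)
  | [], _, _ => none
  | p :: rest, sec, pk =>
    match ghostInner p sec 0 with
    | some (sk, s) => some (pk, sk, p, s)
    | none => ghostOuter rest sec (pk + 1)

-- joinmapP with the six parsed numbers abstracted (equal to joinmapP by rfl)
def joinCore (a1 b1 l1 a2 b2 l2 : Int) : PySem.Dict String (List String) :=
  let t1andt2 := intersectionP [a1, a1 + l1] [b2, b2 + l2]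
  let t1minust2 := differenceP [a1, a1 + l1] [b2, b2 + l2]
  let t2minust1 := differenceP [b2, b2 + l2] [a1, a1 + l1]
  let t1d := b1 - a1
  let t2d := b2 - a2
  let m1 := t1andt2.map (fun i => i + t1d)
  let joined : PySem.Dict String (List String) := PySem.Dict.empty
  let joined := if m1.length > 0 then
      joined.insert "intersection"
        [fmt3 (PySem.List.pyGetD t1andt2 0 0 - t2d) (PySem.List.pyGetD m1 0 0)
              (PySem.List.pyGetD m1 1 0 - PySem.List.pyGetD m1 0 0)]
    else joined
  let joined := t1minust2.foldl (fun d pair =>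
      d.modify "primary" [] (fun v => v ++
        [fmt3 (PySem.List.pyGetD pair 0 0) (PySem.List.pyGetD pair 0 0 + t1d)
              (PySem.List.pyGetD pair 1 0 - PySem.List.pyGetD pair 0 0)])) joined
  let joined := t2minust1.foldl (fun d pair =>
      d.modify "secondary" [] (fun v => v ++
        [fmt3 (PySem.List.pyGetD pair 0 0 - t2d) (PySem.List.pyGetD pair 0 0)
              (PySem.List.pyGetD pair 1 0 - PySem.List.pyGetD pair 0 0)])) joined
  joined

theorem joinmapP_eq_core (p s : String) :
    joinmapP p s = joinCore (parse3B p).1 (parse3B p).2.1 (parse3B p).2.2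
      (parse3B s).1 (parse3B s).2.1 (parse3B s).2.2 := rfl

theorem pyGetD_pair0 (a b d : Int) : PySem.List.pyGetD [a, b] 0 d = a := rfl
theorem pyGetD_pair1 (a b d : Int) : PySem.List.pyGetD [a, b] 1 d = b := rfl
theorem pyGetD_pairm1 (a b d : Int) : PySem.List.pyGetD [a, b] (-1) d = b := rfl

theorem slice13 {α : Type} (w x y z : α) :
    PySem.List.slice [w, x, y, z] (some 1) (some 3) = [x, y] := rfl

theorem perm4 (a b c d : Int) : ([c, d, a, b] : List Int).Perm [a, b, c, d] := by
  have h : ([c, d] ++ [a, b] : List Int).Perm ([a, b] ++ [c, d]) := List.perm_append_comm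
  simpa using h

theorem sorted_perm_inv {xs ys : List Int} (h : xs.Perm ys) :
    PySem.List.sorted xs (fun x => x) false = PySem.List.sorted ys (fun x => x) false := by
  apply PySem.List.sorted_id_eq_of_perm_of_pairwise
  · exact (PySem.List.sorted_perm ys (fun x => x) false).trans h.symm
  · simpa using PySem.List.sorted_pairwise ys (fun x => x)

theorem sorted4 (a b c d : Int) : ∃ w x y z,
    PySem.List.sorted [a, b, c, d] (fun x => x) false = [w, x, y, z] := by
  rcases hL : PySem.List.sorted [a, b, c, d] (fun x => x) false with
    _ | ⟨w, _ | ⟨x, _ | ⟨y, _ | ⟨z, _ | ⟨u, t⟩⟩⟩⟩⟩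
  all_goals
    first
    | exact ⟨_, _, _, _, rfl⟩
    | (exfalso
       have h4 := PySem.List.length_sorted [a, b, c, d] (fun x => x) false
       rw [hL] at h4
       simp at h4)

theorem intersectionP_pair (a b c d : Int) :
    intersectionP [a, b] [c, d] =
      if b ≤ c ∨ d ≤ a then []
      else PySem.List.slice (PySem.List.sorted [a, b, c, d] (fun x => x) false)
             (some 1) (some 3) := by
  simp only [intersectionP, pyGetD_pair0, pyGetD_pairm1, List.cons_append, List.nil_append]

theorem differenceP_of_empty (r1 r2 : List Int) (h : intersectionP r1 r2 = []) :
    differenceP r1 r2 = [r1] := by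
  simp [differenceP, h]

theorem differenceP_pair (a b c d x y : Int) (h : intersectionP [a, b] [c, d] = [x, y]) :
    differenceP [a, b] [c, d] =
      (if x > a then [[a, x]] else []) ++ (if y < b then [[y, b]] else []) := by
  simp only [differenceP, h, pyGetD_pair0, pyGetD_pair1, List.length_cons,
    List.length_nil]
  norm_num
  split_ifs <;> simp

theorem core_contains (a1 b1 l1 a2 b2 l2 : Int) :
    (joinCore a1 b1 l1 a2 b2 l2).contains "intersection" =
      decide (a1 + l1 > b2 ∧ b2 + l2 > a1) := by
  by_cases hc : a1 + l1 ≤ b2 ∨ b2 + l2 ≤ a1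
  · have hI1 : intersectionP [a1, a1 + l1] [b2, b2 + l2] = [] := by
      rw [intersectionP_pair, if_pos hc]
    have hI2 : intersectionP [b2, b2 + l2] [a1, a1 + l1] = [] := by
      rw [intersectionP_pair, if_pos (Or.symm hc)]
    simp only [joinCore, hI1, differenceP_of_empty _ _ hI1, differenceP_of_empty _ _ hI2]
    simp only [List.map_nil, List.length_nil, gt_iff_lt, lt_self_iff_false, if_false,
      List.foldl_cons, List.foldl_nil, PySem.Dict.contains_modify, PySem.Dict.contains_empty]
    simp
    omega
  · obtain ⟨w, x, y, z, hsrt⟩ := sorted4 a1 (a1 + l1) b2 (b2 + l2)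
    have hI1 : intersectionP [a1, a1 + l1] [b2, b2 + l2] = [x, y] := by
      rw [intersectionP_pair, if_neg hc, hsrt, slice13]
    have hI2 : intersectionP [b2, b2 + l2] [a1, a1 + l1] = [x, y] := by
      rw [intersectionP_pair, if_neg (fun h => hc (Or.symm h)),
        sorted_perm_inv (perm4 a1 (a1 + l1) b2 (b2 + l2)), hsrt, slice13]
    simp only [joinCore, hI1, differenceP_pair _ _ _ _ _ _ hI1, differenceP_pair _ _ _ _ _ _ hI2]
    split_ifs <;>
      simp only [List.map_cons, List.map_nil, List.length_cons, List.length_nil,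
        List.append_nil, List.nil_append, List.cons_append, List.foldl_cons, List.foldl_nil,
        PySem.Dict.contains_modify, PySem.Dict.contains_insert, PySem.Dict.contains_empty] <;>
      simp_all <;> omega

theorem contains_joinmap (p s : String) :
    (joinmapP p s).contains "intersection" = ovlB p s := by
  rw [joinmapP_eq_core, core_contains]; rfl

theorem core_step (a1 b1 l1 a2 b2 l2 lo hi : Int)
    (h : a1 + l1 > b2 ∧ b2 + l2 > a1)
    (hlo : lo = PySem.List.pyGetD (PySem.List.slice
      (PySem.List.sorted [a1, a1 + l1, b2, b2 + l2] (fun x => x) false)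
      (some 1) (some 3)) 0 0)
    (hhi : hi = PySem.List.pyGetD (PySem.List.slice
      (PySem.List.sorted [a1, a1 + l1, b2, b2 + l2] (fun x => x) false)
      (some 1) (some 3)) 1 0) :
    (joinCore a1 b1 l1 a2 b2 l2).getD "intersection" [] =
      [fmt3 (lo - (b2 - a2)) (lo + (b1 - a1)) (hi - lo)] ∧
    (joinCore a1 b1 l1 a2 b2 l2).getD "primary" [] =
      (if lo > a1 then [fmt3 a1 (a1 + (b1 - a1)) (lo - a1)] else []) ++
      (if hi < a1 + l1 then [fmt3 hi (hi + (b1 - a1)) (a1 + l1 - hi)] else []) ∧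
    (joinCore a1 b1 l1 a2 b2 l2).getD "secondary" [] =
      (if lo > b2 then [fmt3 (b2 - (b2 - a2)) b2 (lo - b2)] else []) ++
      (if hi < b2 + l2 then [fmt3 (hi - (b2 - a2)) hi (b2 + l2 - hi)] else []) := by
  have hc : ¬ (a1 + l1 ≤ b2 ∨ b2 + l2 ≤ a1) := by omega
  obtain ⟨w, x, y, z, hsrt⟩ := sorted4 a1 (a1 + l1) b2 (b2 + l2)
  have hlo' : lo = x := by rw [hlo, hsrt, slice13, pyGetD_pair0]
  have hhi' : hi = y := by rw [hhi, hsrt, slice13, pyGetD_pair1]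
  subst hlo' hhi'
  have hI1 : intersectionP [a1, a1 + l1] [b2, b2 + l2] = [lo, hi] := by
    rw [intersectionP_pair, if_neg hc, hsrt, slice13]
  have hI2 : intersectionP [b2, b2 + l2] [a1, a1 + l1] = [lo, hi] := by
    rw [intersectionP_pair, if_neg (fun h' => hc (Or.symm h')),
      sorted_perm_inv (perm4 a1 (a1 + l1) b2 (b2 + l2)), hsrt, slice13]
  simp only [joinCore, hI1, differenceP_pair _ _ _ _ _ _ hI1, differenceP_pair _ _ _ _ _ _ hI2]
  have harg : ∀ t : Int, (hi + t) - (lo + t) = hi - lo := fun t => by ring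
  rw [if_pos (show (List.map (fun i => i + (b1 - a1)) [lo, hi]).length > 0 by simp)]
  split_ifs <;>
    simp [List.foldl_cons, List.foldl_nil, PySem.Dict.getD_modify, PySem.Dict.getD_insert,
      PySem.Dict.getD_empty, pyGetD_pair0, pyGetD_pair1, harg]

theorem ghostInner_ovl (p : String) : ∀ (sec : List String) (k sk : Int) (s : String),
    ghostInner p sec k = some (sk, s) → ovlB p s = true := by
  intro sec
  induction sec with
  | nil => intro k sk s h; simp [ghostInner] at h
  | cons t rest ih =>
    intro k sk s h
    by_cases hov : ovlB p t
    · rw [ghostInner, if_pos hov] at h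
      obtain ⟨rfl, rfl⟩ : k = sk ∧ t = s := by simpa using h
      exact hov
    · rw [ghostInner, if_neg hov] at h
      exact ih _ _ _ h

theorem ghostOuter_ovl : ∀ (prim sec : List String) (k pk sk : Int) (p s : String),
    ghostOuter prim sec k = some (pk, sk, p, s) → ovlB p s = true := by
  intro prim
  induction prim with
  | nil => intro sec k pk sk p s h; simp [ghostOuter] at h
  | cons q rest ih =>
    intro sec k pk sk p s h
    rw [ghostOuter] at h
    cases hgi : ghostInner q sec 0 with
    | some r =>
      rw [hgi] at h
      obtain ⟨sk', s'⟩ := r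
      obtain ⟨rfl, rfl, rfl, rfl⟩ : k = pk ∧ sk' = sk ∧ q = p ∧ s' = s := by
        simpa using h
      exact ghostInner_ovl _ _ _ _ _ hgi
    | none =>
      rw [hgi] at h
      exact ih _ _ _ _ _ _ h

theorem innerA_eq (p : String) : ∀ (sec : List String) (k : Int),
    innerScanA p sec k = (ghostInner p sec k).map (fun r => (r.1, joinmapP p r.2)) := by
  intro sec
  induction sec with
  | nil => intro k; rfl
  | cons s rest ih =>
    intro k
    rw [innerScanA, ghostInner]
    simp only [contains_joinmap]
    by_cases hov : ovlB p s
    · simp [hov]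
    · simp [hov, ih (k + 1)]

theorem outerA_eq : ∀ (prim sec : List String) (k : Int),
    outerScanA prim sec k =
      (ghostOuter prim sec k).map (fun r => (r.1, r.2.1, joinmapP r.2.2.1 r.2.2.2)) := by
  intro prim
  induction prim with
  | nil => intro sec k; rfl
  | cons p rest ih =>
    intro sec k
    rw [outerScanA, ghostOuter, innerA_eq]
    cases hgi : ghostInner p sec 0 with
    | some r => simp
    | none => simp [ih]

theorem innerB_eq (p : String) (pk : Int) : ∀ (sec : List String) (k : Int),
    (PySem.List.enumerate sec k).findSome? (fun se =>
      let t1 := parse3B p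
      let t2 := parse3B se.2
      if t1.1 + t1.2.2 > t2.2.1 ∧ t2.2.1 + t2.2.2 > t1.1 then
        some ((pk, se.1), t1, t2)
      else none)
    = (ghostInner p sec k).map (fun r => ((pk, r.1), parse3B p, parse3B r.2)) := by
  intro sec
  induction sec with
  | nil => intro k; rfl
  | cons s rest ih =>
    intro k
    rw [PySem.List.enumerate_cons, ghostInner]
    simp only [List.findSome?_cons]
    by_cases hov : (parse3B p).1 + (parse3B p).2.2 > (parse3B s).2.1 ∧
        (parse3B s).2.1 + (parse3B s).2.2 > (parse3B p).1
    · have hb : ovlB p s = true := by simp [ovlB, hov]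
      simp [hov, hb]
    · have hb : ovlB p s = false := by simp [ovlB, hov]
      simp only [hov, if_neg, hb, Bool.false_eq_true, if_false]
      · exact ih (k + 1)

theorem scanB_aux : ∀ (prim : List String) (sec : List String) (k : Int),
    (PySem.List.enumerate prim k).findSome? (fun pe =>
      (PySem.List.enumerate sec 0).findSome? (fun se =>
        let t1 := parse3B pe.2
        let t2 := parse3B se.2
        if t1.1 + t1.2.2 > t2.2.1 ∧ t2.2.1 + t2.2.2 > t1.1 then
          some ((pe.1, se.1), t1, t2)
        else none))
    = (ghostOuter prim sec k).map
        (fun r => ((r.1, r.2.1), parse3B r.2.2.1, parse3B r.2.2.2)) := by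
  intro prim
  induction prim with
  | nil => intro sec k; rfl
  | cons p rest ih =>
    intro sec k
    rw [PySem.List.enumerate_cons, ghostOuter]
    simp only [List.findSome?_cons]
    rw [innerB_eq p k sec 0]
    cases hgi : ghostInner p sec 0 with
    | some r => simp
    | none => simp [ih]

theorem scanB_eq (prim sec : List String) :
    scanB prim sec =
      (ghostOuter prim sec 0).map
        (fun r => ((r.1, r.2.1), parse3B r.2.2.1, parse3B r.2.2.2)) := by
  rw [scanB, scanB_aux]

theorem loop_eq : ∀ (fuel : Nat) (res prim sec : List String),
    loopB fuel res prim sec = res ++ coupleMapRecFuelA fuel prim sec := by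
  intro fuel
  induction fuel with
  | zero => intro res prim sec; simp [loopB, coupleMapRecFuelA]
  | succ n ih =>
    intro res prim sec
    rw [loopB, coupleMapRecFuelA, scanB_eq, outerA_eq]
    cases hg : ghostOuter prim sec 0 with
    | none => simp
    | some r =>
      obtain ⟨pk, sk, p, s⟩ := r
      have hov := ghostOuter_ovl prim sec 0 pk sk p s hg
      rcases e1 : parse3B p with ⟨a1, b1, l1⟩
      rcases e2 : parse3B s with ⟨a2, b2, l2⟩
      have h : a1 + l1 > b2 ∧ b2 + l2 > a1 := by
        rw [ovlB, e1, e2] at hov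
        simpa using hov
      obtain ⟨g1, g2, g3⟩ := core_step a1 b1 l1 a2 b2 l2 _ _ h rfl rfl
      simp only [Option.map_some, e1, e2, joinmapP_eq_core, g1, g2, g3, ih,
        List.append_assoc]

-- ===== VERDICT (by name: the statement is the Claim_ definition above) =====
theorem coupleMapRec_spec : Claim_equal_coupleMapRec := by
  intro primary secondary _ _
  unfold Spec_coupleMapRec coupleMapRec coupleMapRec_alt
  rw [loop_eq]
  simp
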